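-- pv_equiv track=rewrite | github.com/bettercollected/bettercollected | integrations/typeform/typeform/app/services/transformer_service.py | _format_typeform_date
-- ===== SOURCE A (Python) =====
-- def _format_typeform_date(date_format: str, date_separator: str) -> str:
--     combined_format = ""
--     prev_char = None
--     for char in date_format:
--         # if the previous character is not None and is different from the current character
--         if prev_char is not None and prev_char != char:
--             combined_format += date_separator
--         combined_format += char
--         prev_char = char
--     return combined_format
-- ===== SOURCE B (Python) =====
-- def _format_typeform_date(date_format: str, date_separator: str) -> str:
--     # group the format into maximal runs of equal characters, then join the runs
--     runs = []
--     s = date_format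
--     while s:
--         run_len = 1
--         while run_len < len(s) and s[run_len] == s[0]:
--             run_len += 1
--         runs.append(s[:run_len])
--         s = s[run_len:]
--     return date_separator.join(runs)
-- ===== Notes on version B (the rewrite author's own statement) =====
-- stated objective: alternative
-- what changed: Replaces the per-character prev_char/accumulator loop with a group-then-join decomposition: split the format into maximal runs of equal characters, then join the runs with the separator.
import Mathlib
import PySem

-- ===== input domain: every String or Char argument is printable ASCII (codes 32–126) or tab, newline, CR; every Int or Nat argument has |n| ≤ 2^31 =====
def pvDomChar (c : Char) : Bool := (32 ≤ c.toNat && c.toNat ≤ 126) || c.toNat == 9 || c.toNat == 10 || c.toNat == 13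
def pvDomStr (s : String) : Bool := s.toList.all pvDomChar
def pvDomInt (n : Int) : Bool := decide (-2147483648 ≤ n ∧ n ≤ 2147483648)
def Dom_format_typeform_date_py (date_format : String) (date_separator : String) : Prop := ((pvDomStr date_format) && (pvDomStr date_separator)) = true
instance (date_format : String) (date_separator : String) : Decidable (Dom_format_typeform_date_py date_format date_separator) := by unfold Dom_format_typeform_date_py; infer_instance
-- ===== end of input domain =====

-- B replaces A's per-character prev_char loop with a group-runs-then-join decomposition (alternative, not claimed faster).


-- ===== PORT A =====
-- A's loop: state (combined_format, prev_char), one step per character.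
def pvGoA (ds : List Char) (acc : List Char) (prev : Option Char) : List Char → List Char
  | [] => acc
  | c :: rest =>
      let acc' := (match prev with
        | some p => if p ≠ c then acc ++ ds else acc
        | none => acc) ++ [c]
      pvGoA ds acc' (some c) rest

def format_typeform_date_py (date_format : String) (date_separator : String) : String :=
  String.mk (pvGoA date_separator.toList [] none date_format.toList)

-- ===== PORT B =====
-- Source B: peel off the maximal run of the first character (s[:run_len] / s[run_len:]), collect runs, then join.
def pvRuns : List Char → List (List Char)
  | [] => []
  | c :: rest =>
      (c :: rest.takeWhile (· = c)) :: pvRuns (rest.dropWhile (· = c))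
  termination_by l => l.length
  decreasing_by
    simp only [List.length_cons]
    exact Nat.lt_succ_of_le (List.length_dropWhile_le _ _)

-- str.join over the run list
def pvJoin (sep : List Char) : List (List Char) → List Char
  | [] => []
  | [g] => g
  | g :: gs => g ++ sep ++ pvJoin sep gs

def format_typeform_date_py_alt (date_format : String) (date_separator : String) : String :=
  String.mk (pvJoin date_separator.toList (pvRuns date_format.toList))

-- ===== PRECONDITION & SPEC =====
def Spec_format_typeform_date_py (date_format : String) (date_separator : String) (out : String) : Prop := out = format_typeform_date_py_alt date_format date_separator
instance (date_format : String) (date_separator : String) (out : String) : Decidable (Spec_format_typeform_date_py date_format date_separator out) := by unfold Spec_format_typeform_date_py; infer_instance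

-- ===== CLAIM (what is proved, stated in full; the proofs are below) =====
def Claim_equal_format_typeform_date_py : Prop := ∀ (date_format : String) (date_separator : String), Dom_format_typeform_date_py date_format date_separator → Spec_format_typeform_date_py date_format date_separator (format_typeform_date_py date_format date_separator)

-- ===== LEMMAS AND PROOFS =====

theorem pvRuns_nil : pvRuns [] = [] := by rw [pvRuns.eq_def]

theorem pvRuns_cons (c : Char) (l : List Char) :
    pvRuns (c :: l) = (c :: l.takeWhile (· = c)) :: pvRuns (l.dropWhile (· = c)) := by
  rw [pvRuns.eq_def]

-- the suffix A produces once a previous character p exists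
def pvJ (ds : List Char) (p : Char) : List Char → List Char
  | [] => []
  | c :: rest => (if p ≠ c then ds else []) ++ c :: pvJ ds c rest

theorem pvGoA_some (ds : List Char) (l : List Char) :
    ∀ (acc : List Char) (p : Char), pvGoA ds acc (some p) l = acc ++ pvJ ds p l := by
  induction l with
  | nil => intro acc p; simp [pvGoA, pvJ]
  | cons c rest ih =>
      intro acc p
      simp only [pvGoA, pvJ, ih]
      by_cases h : p = c <;> simp [h]

theorem pvJ_run (ds : List Char) (c : Char) :
    ∀ (t : List Char), (∀ x ∈ t, x = c) → ∀ d, pvJ ds c (t ++ d) = t ++ pvJ ds c d := by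
  intro t
  induction t with
  | nil => intro _ d; simp
  | cons a t ih =>
      intro h d
      have ha : a = c := h a (by simp)
      subst ha
      simp [pvJ, ih (fun x hx => h x (by simp [hx]))]

theorem pvRuns_ne_nil (c : Char) (l : List Char) : pvRuns (c :: l) ≠ [] := by
  rw [pvRuns_cons]; simp

theorem pvJoin_cons_ne (sep g : List Char) (gs : List (List Char)) (h : gs ≠ []) :
    pvJoin sep (g :: gs) = g ++ sep ++ pvJoin sep gs := by
  cases gs with
  | nil => exact absurd rfl h
  | cons x xs => rfl

theorem pv_main (ds : List Char) : ∀ (n : ℕ) (l : List Char) (c : Char), l.length ≤ n →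
    pvJoin ds (pvRuns (c :: l)) = c :: pvJ ds c l := by
  intro n
  induction n with
  | zero =>
      intro l c hl
      have : l = [] := List.eq_nil_of_length_eq_zero (Nat.le_zero.mp hl)
      subst this
      simp [pvRuns_cons, pvRuns_nil, pvJoin, pvJ]
  | succ n ih =>
      intro l c hl
      rw [pvRuns_cons]
      have hsplit : l.takeWhile (· = c) ++ l.dropWhile (· = c) = l := List.takeWhile_append_dropWhile
      have htk : ∀ x ∈ l.takeWhile (· = c), x = c := by
        intro x hx
        have := List.mem_takeWhile_imp hx
        simpa using this
      cases hd : l.dropWhile (· = c) with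
      | nil =>
          have hl' : l.takeWhile (· = c) = l := by
            have h0 := hsplit; rw [hd, List.append_nil] at h0; exact h0
          have hall : ∀ x ∈ l, x = c := by rw [hl'] at htk; exact htk
          have hJl : pvJ ds c l = l := by
            have := pvJ_run ds c l hall []
            simpa [pvJ] using this
          rw [pvRuns_nil]
          simp [pvJoin, hl', hJl]
      | cons c' d' =>
          have hc' : ¬ (c' = c) := by
            have := List.head?_dropWhile_not (p := fun x => decide (x = c)) (l := l)
            rw [hd] at this
            simpa using this
          have hlen : d'.length ≤ n := by
            have h1 : (l.dropWhile (· = c)).length ≤ l.length := List.length_dropWhile_le _ _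
            rw [hd] at h1
            simp only [List.length_cons] at h1
            omega
          have hJ : pvJ ds c l = (l.takeWhile (· = c)) ++ (ds ++ c' :: pvJ ds c' d') := by
            conv_lhs => rw [← hsplit, hd]
            rw [pvJ_run ds c _ htk (c' :: d')]
            simp [pvJ, Ne.symm hc']
          rw [pvJoin_cons_ne _ _ _ (pvRuns_ne_nil c' d'), ih d' c' hlen, hJ]
          simp

-- ===== VERDICT (by name: the statement is the Claim_ definition above) =====
theorem format_typeform_date_py_spec : Claim_equal_format_typeform_date_py := by
  intro df ds _
  unfold Spec_format_typeform_date_py format_typeform_date_py format_typeform_date_py_alt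
  cases h : df.toList with
  | nil => simp [pvGoA, pvRuns_nil, pvJoin]
  | cons c rest =>
      rw [pv_main ds.toList rest.length rest c (le_refl _)]
      simp [pvGoA, pvGoA_some]
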